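-- pv_equiv track=rewrite | github.com/lukearno/blank-app | streamlit_app.py | identify_current_skill
-- ===== SOURCE A (Python) =====
-- skill_keywords = {
--     "sql": ["sql"],
--     "python": ["python"],
--     "powerbi": ["powerbi"],
-- }
--
-- def identify_current_skill(question, previous_questions):
--
--     question_text = question.lower()
--     for skill, keywords in skill_keywords.items():
--         if any(
--             keyword in question_text
--             or any(keyword in q.lower() for q in previous_questions)
--             for keyword in keywords
--         ):
--             return skill
--     return None
-- ===== SOURCE B (Python) =====
-- skill_keywords = {
--     "sql": ["sql"],
--     "python": ["python"],
--     "powerbi": ["powerbi"],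
-- }
--
-- def identify_current_skill(question, previous_questions):
--     # Inverted loop nesting: compute, per text, the rank (position) of the first
--     # skill whose keyword occurs in it; the answer is the skill of minimum rank.
--     items = list(skill_keywords.items())
--
--     def rank(text):
--         t = text.lower()
--         for i, (_skill, keywords) in enumerate(items):
--             if any(k in t for k in keywords):
--                 return i
--         return len(items)
--
--     best = min(rank(text) for text in [question, *previous_questions])
--     return items[best][0] if best < len(items) else None
-- ===== Notes on version B (the rewrite author's own statement) =====
-- stated objective: alternative
-- what changed: B inverts the loop nesting: it computes for each text (question and each previous question) the rank of the first skill whose keyword occurs in it, takes the minimum rank over all texts, and returns the skill at that rank (None if no text matches), instead of A's per-skill rescan of the whole history.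
import Mathlib
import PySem

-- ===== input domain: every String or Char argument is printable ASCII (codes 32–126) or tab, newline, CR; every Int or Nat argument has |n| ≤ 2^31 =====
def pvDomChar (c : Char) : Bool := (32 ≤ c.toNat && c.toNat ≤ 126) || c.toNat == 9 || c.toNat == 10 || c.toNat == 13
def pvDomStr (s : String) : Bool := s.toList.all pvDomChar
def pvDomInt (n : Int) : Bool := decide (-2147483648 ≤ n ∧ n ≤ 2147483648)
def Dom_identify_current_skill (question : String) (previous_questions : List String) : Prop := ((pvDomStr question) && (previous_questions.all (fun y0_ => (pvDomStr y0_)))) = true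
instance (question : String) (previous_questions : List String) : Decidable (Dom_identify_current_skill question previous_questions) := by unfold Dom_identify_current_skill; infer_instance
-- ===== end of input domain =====

-- B inverts the loop nesting: per text, the rank of the first matching skill; answer = skill of
-- minimum rank over all texts (objective: alternative, same cost).

-- ===== PORT A =====
-- module-level constant skill_keywords (dict, insertion order)
def pvSkillKeywords : List (String × List String) :=
  [("sql", ["sql"]), ("python", ["python"]), ("powerbi", ["powerbi"])]

-- the 'for skill, keywords in skill_keywords.items()' loop of A
def pvALoop (question_text : String) (previous_questions : List String) :
    List (String × List String) → Option String
  | [] => none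
  | (skill, keywords) :: rest =>
    if keywords.any (fun keyword =>
        PySem.Str.isIn keyword question_text ||
        previous_questions.any (fun q => PySem.Str.isIn keyword (PySem.Str.lower q))) then
      some skill
    else pvALoop question_text previous_questions rest

def identify_current_skill (question : String) (previous_questions : List String) : Option String :=
  pvALoop (PySem.Str.lower question) previous_questions pvSkillKeywords

-- ===== PORT B =====
-- items = list(skill_keywords.items())
def pvItems : List (String × List String) :=
  [("sql", ["sql"]), ("python", ["python"]), ("powerbi", ["powerbi"])]

-- rank's 'for i, (_skill, keywords) in enumerate(items)' loop; falls through to len(items)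
def pvRankLoop (t : String) : Nat → List (String × List String) → Nat
  | i, [] => i
  | i, (_, keywords) :: rest =>
    if keywords.any (fun k => PySem.Str.isIn k t) then i else pvRankLoop t (i + 1) rest

-- def rank(text): t = text.lower(); …
def pvRank (text : String) : Nat := pvRankLoop (PySem.Str.lower text) 0 pvItems

def identify_current_skill_alt (question : String) (previous_questions : List String) : Option String :=
  let ranks := (question :: previous_questions).map pvRank
  let best := match ranks with
    | [] => 0            -- unreachable: the list starts with question
    | r :: rs => rs.foldl Nat.min r
  if h : best < pvItems.length then some ((pvItems[best]'h).1) else none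

-- ===== PRECONDITION & SPEC =====
def Spec_identify_current_skill (question : String) (previous_questions : List String) (out : Option String) : Prop := out = identify_current_skill_alt question previous_questions
instance (question : String) (previous_questions : List String) (out : Option String) : Decidable (Spec_identify_current_skill question previous_questions out) := by unfold Spec_identify_current_skill; infer_instance

-- ===== CLAIM (what is proved, stated in full; the proofs are below) =====
def Claim_equal_identify_current_skill : Prop := ∀ (question : String) (previous_questions : List String), Dom_identify_current_skill question previous_questions → Spec_identify_current_skill question previous_questions (identify_current_skill question previous_questions)

-- ===== LEMMAS AND PROOFS =====

-- keyword k occurs in text t (after lowering t)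
def pvHit (k : String) (t : String) : Bool := PySem.Str.isIn k (PySem.Str.lower t)

-- pvRank as an if-chain over the three keywords
theorem pvRank_eq (t : String) :
    pvRank t = if pvHit "sql" t then 0 else if pvHit "python" t then 1
               else if pvHit "powerbi" t then 2 else 3 := by
  simp [pvRank, pvRankLoop, pvItems, pvHit]

theorem pvRank_le (t : String) : pvRank t ≤ 3 := by
  rw [pvRank_eq]; split_ifs <;> omega

-- the combined rank of a list of texts as an if-chain over per-keyword 'any' tests
def pvPhi (l : List String) : Nat :=
  if l.any (pvHit "sql") then 0 else if l.any (pvHit "python") then 1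
  else if l.any (pvHit "powerbi") then 2 else 3

-- prepending a text combines by Nat.min
theorem pv_min_rank (t : String) (l : List String) :
    Nat.min (pvRank t) (pvPhi l) = pvPhi (t :: l) := by
  cases h1 : pvHit "sql" t <;> cases h2 : pvHit "python" t <;> cases h3 : pvHit "powerbi" t <;>
    cases h4 : l.any (pvHit "sql") <;> cases h5 : l.any (pvHit "python") <;>
    cases h6 : l.any (pvHit "powerbi") <;>
    simp [pvPhi, pvRank_eq, List.any_cons, h1, h2, h3, h4, h5, h6]

-- folding Nat.min over the ranks computes pvPhi
theorem pv_fold_eq (l : List String) : ∀ (b : Nat), b ≤ 3 →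
    (l.map pvRank).foldl Nat.min b = Nat.min b (pvPhi l) := by
  induction l with
  | nil =>
    intro b hb
    have h3 : pvPhi ([] : List String) = 3 := rfl
    simp only [List.map_nil, List.foldl_nil, h3]
    exact (Nat.min_eq_left hb).symm
  | cons t l ih =>
    intro b hb
    have hb' : Nat.min b (pvRank t) ≤ 3 := le_trans (Nat.min_le_left _ _) hb
    simp only [List.map_cons, List.foldl_cons]
    rw [ih _ hb']
    have ha : (Nat.min b (pvRank t)).min (pvPhi l) = Nat.min b ((pvRank t).min (pvPhi l)) :=
      Nat.min_assoc b _ _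
    rw [ha, pv_min_rank]

-- ===== VERDICT (by name: the statement is the Claim_ definition above) =====
theorem identify_current_skill_spec : Claim_equal_identify_current_skill := by
  intro question pqs _
  show identify_current_skill question pqs = identify_current_skill_alt question pqs
  have hbest : List.foldl Nat.min (pvRank question) (List.map pvRank pqs)
      = pvPhi (question :: pqs) := by
    rw [pv_fold_eq pqs (pvRank question) (pvRank_le question), pv_min_rank]
  simp only [identify_current_skill, identify_current_skill_alt, pvSkillKeywords, pvALoop,
    List.map_cons, hbest]
  simp only [pvPhi, List.any_cons, List.any_nil, Bool.or_false]
  have e1 : (fun q => PySem.Str.isIn "sql" (PySem.Str.lower q)) = pvHit "sql" := rfl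
  have e2 : (fun q => PySem.Str.isIn "python" (PySem.Str.lower q)) = pvHit "python" := rfl
  have e3 : (fun q => PySem.Str.isIn "powerbi" (PySem.Str.lower q)) = pvHit "powerbi" := rfl
  have e4 : ∀ k, PySem.Str.isIn k (PySem.Str.lower question) = pvHit k question := fun _ => rfl
  rw [e1, e2, e3, e4, e4, e4]
  split_ifs <;> first | rfl | omega | simp_all [pvItems]
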